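-- pv_equiv track=rewrite | github.com/dshahnaz/pr-triage-prompt | src/pr_triage_prompt/chunk.py | _header_with_part_label
-- ===== SOURCE A (Python) =====
-- def _header_with_part_label(header_md: str, part: int, total: int) -> str:
--     """Append a `**Part:** K/N` line inside the header (after the `# ` title)."""
--     lines = header_md.splitlines()
--     out: list[str] = []
--     inserted = False
--     for line in lines:
--         out.append(line)
--         if not inserted and line.startswith("# "):
--             out.append(f"**Part:** {part}/{total}")
--             inserted = True
--     return "\n".join(out).rstrip() + "\n"
-- ===== SOURCE B (Python) =====
-- def _header_with_part_label(header_md: str, part: int, total: int) -> str: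
--     label = f"**Part:** {part}/{total}"
--
--     def insert(lines):
--         # recursion on the list: stop scanning as soon as the title is found
--         if not lines:
--             return []
--         head, *rest = lines
--         if head.startswith("# "):
--             return [head, label, *rest]
--         return [head, *insert(rest)]
--
--     return "\n".join(insert(header_md.splitlines())).rstrip() + "\n"
-- ===== Notes on version B (the rewrite author's own statement) =====
-- stated objective: alternative
-- what changed: Replaces A's accumulate-with-inserted-flag loop by a structural recursion that rebuilds the line list and terminates the scan the moment the first '# ' title is found, splicing label and untouched tail without any flag state.
import Mathlib
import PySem

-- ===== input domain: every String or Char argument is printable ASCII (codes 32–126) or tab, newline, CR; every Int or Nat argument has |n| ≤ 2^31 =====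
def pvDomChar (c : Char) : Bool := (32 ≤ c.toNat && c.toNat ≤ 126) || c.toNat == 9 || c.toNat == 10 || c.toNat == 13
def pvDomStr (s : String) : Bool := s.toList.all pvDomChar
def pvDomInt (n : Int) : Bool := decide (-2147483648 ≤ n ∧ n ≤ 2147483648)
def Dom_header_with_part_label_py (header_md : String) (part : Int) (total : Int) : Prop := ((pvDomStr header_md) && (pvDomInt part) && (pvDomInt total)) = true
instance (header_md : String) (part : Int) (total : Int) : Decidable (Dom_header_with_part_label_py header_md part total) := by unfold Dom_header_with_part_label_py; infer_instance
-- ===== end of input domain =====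

-- B replaces A's accumulate-with-inserted-flag loop by a structural recursion that stops scanning at the first '# ' title and splices the label before the untouched tail (objective: alternative).

-- ===== PORT A =====
-- f"**Part:** {part}/{total}"
def pvLabel (part total : Int) : String :=
  "**Part:** " ++ PySem.Int.toStr part ++ "/" ++ PySem.Int.toStr total

-- loop body of A's for-loop
def pvStep (lbl : String) (st : List String × Bool) (line : String) : List String × Bool :=
  let out := st.1 ++ [line]
  if !st.2 && PySem.Str.startswith line "# " then (out ++ [lbl], true) else (out, st.2)

def header_with_part_label_py (header_md : String) (part : Int) (total : Int) : String :=
  let lines := PySem.Str.splitlines header_md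
  let st := lines.foldl (pvStep (pvLabel part total)) ([], false)
  PySem.Str.rstrip (PySem.Str.join "\n" st.1) ++ "\n"

-- ===== PORT B =====
-- Source B's recursive helper `insert`
def pvInsert (lbl : String) : List String → List String
  | [] => []
  | l :: rest =>
    if PySem.Str.startswith l "# " then l :: lbl :: rest
    else l :: pvInsert lbl rest

def header_with_part_label_py_alt (header_md : String) (part : Int) (total : Int) : String :=
  PySem.Str.rstrip (PySem.Str.join "\n" (pvInsert (pvLabel part total) (PySem.Str.splitlines header_md))) ++ "\n"

-- ===== PRECONDITION & SPEC =====
def Spec_header_with_part_label_py (header_md : String) (part : Int) (total : Int) (out : String) : Prop := out = header_with_part_label_py_alt header_md part total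
instance (header_md : String) (part : Int) (total : Int) (out : String) : Decidable (Spec_header_with_part_label_py header_md part total out) := by unfold Spec_header_with_part_label_py; infer_instance

-- ===== CLAIM (what is proved, stated in full; the proofs are below) =====
def Claim_equal_header_with_part_label_py : Prop := ∀ (header_md : String) (part : Int) (total : Int), Dom_header_with_part_label_py header_md part total → Spec_header_with_part_label_py header_md part total (header_with_part_label_py header_md part total)

-- ===== LEMMAS AND PROOFS =====

theorem pvStep_true (lbl l : String) (acc : List String) :
    pvStep lbl (acc, true) l = (acc ++ [l], true) := rfl

-- once inserted, A's loop only appends the remaining lines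
theorem pv_foldl_true (lbl : String) :
    ∀ (ls : List String) (acc : List String),
      ls.foldl (pvStep lbl) (acc, true) = (acc ++ ls, true) := by
  intro ls
  induction ls with
  | nil => intro acc; simp
  | cons l ls ih =>
    intro acc
    rw [List.foldl_cons, pvStep_true, ih]
    simp

-- A's loop from the not-yet-inserted state computes B's recursive splice
theorem pv_foldl_false (lbl : String) :
    ∀ (ls : List String) (acc : List String),
      (ls.foldl (pvStep lbl) (acc, false)).1 = acc ++ pvInsert lbl ls := by
  intro ls
  induction ls with
  | nil => intro acc; simp [pvInsert]
  | cons l ls ih =>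
    intro acc
    cases h : PySem.Str.startswith l "# " with
    | true =>
      rw [List.foldl_cons]
      have hs : pvStep lbl (acc, false) l = (acc ++ [l] ++ [lbl], true) := by
        unfold pvStep; rw [h]; rfl
      rw [hs, pv_foldl_true]
      simp only [PySem.Str.startswith, show ("# ".toList) = ['#',' '] from rfl] at h
      simp [pvInsert, h]
    | false =>
      rw [List.foldl_cons]
      have hs : pvStep lbl (acc, false) l = (acc ++ [l], false) := by
        unfold pvStep; rw [h]; rfl
      rw [hs, ih]
      simp only [PySem.Str.startswith, show ("# ".toList) = ['#',' '] from rfl] at h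
      simp [pvInsert, h]

-- ===== VERDICT (by name: the statement is the Claim_ definition above) =====
theorem header_with_part_label_py_spec : Claim_equal_header_with_part_label_py := by
  intro header_md part total _
  unfold Spec_header_with_part_label_py header_with_part_label_py header_with_part_label_py_alt
  dsimp only
  rw [pv_foldl_false (pvLabel part total) (PySem.Str.splitlines header_md) []]
  simp
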